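-- pv_equiv track=rewrite | github.com/77svene/pulse | scripts/validate/links.py | check_duplicate_links
-- ===== SOURCE A (Python) =====
-- from typing import List, Tuple, Dict, Any, Optional
--
-- def check_duplicate_links(links: List[str]) -> Tuple[bool, List]:
--     """Check for duplicated links.
--
--     Returns a tuple with True or False and duplicate list.
--     """
--
--     seen = {}
--     duplicates = []
--     has_duplicate = False
--
--     for link in links:
--         link = link.rstrip('/')
--         if link not in seen:
--             seen[link] = 1
--         else:
--             if seen[link] == 1:
--                 duplicates.append(link)
--
--     if duplicates:
--         has_duplicate = True
--
--     return (has_duplicate, duplicates)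
-- ===== SOURCE B (Python) =====
-- def check_duplicate_links(links):
--     """Check for duplicated links (trailing slashes ignored).
--
--     Different strategy: normalize, then delete the FIRST occurrence of each
--     distinct value from a copy of the normalized list; what remains is exactly
--     the list of repeated occurrences in encounter order.
--     """
--     normalized = [link.rstrip('/') for link in links]
--     duplicates = list(normalized)
--     for value in dict.fromkeys(normalized):
--         duplicates.remove(value)
--     return (bool(duplicates), duplicates)
-- ===== Notes on version B (the rewrite author's own statement) =====
-- stated objective: alternative
-- what changed: Instead of streaming with a seen-dict and appending repeats, B deletes the first occurrence of each distinct normalized value from a copy of the normalized list; the leftover list is the duplicates.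
import Mathlib
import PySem

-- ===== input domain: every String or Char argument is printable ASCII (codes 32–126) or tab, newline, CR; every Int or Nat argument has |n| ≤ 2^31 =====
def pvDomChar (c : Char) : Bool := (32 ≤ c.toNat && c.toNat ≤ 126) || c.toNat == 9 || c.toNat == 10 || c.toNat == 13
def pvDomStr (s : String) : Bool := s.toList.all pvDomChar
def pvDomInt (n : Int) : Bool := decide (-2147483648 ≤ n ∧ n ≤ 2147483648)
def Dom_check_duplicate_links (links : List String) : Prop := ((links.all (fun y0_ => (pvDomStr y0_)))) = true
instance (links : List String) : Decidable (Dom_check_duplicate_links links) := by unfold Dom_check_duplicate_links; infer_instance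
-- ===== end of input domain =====

-- B replaces A's streaming seen-dict with a delete-first-occurrences strategy:
-- remove each distinct normalized value once from a copy of the normalized list;
-- the leftover list is the duplicates (alternative decomposition, no speed claim).

-- link.rstrip('/') — drop every trailing '/' (exact: Python's str.rstrip with a char set)
def pvRstripSlash (s : String) : String :=
  String.ofList ((s.toList.reverse.dropWhile (fun c => c == '/')).reverse)

-- ===== PORT A =====
-- literal transliteration: fold keeps (seen, duplicates); `seen[link]` is read in the
-- else-branch, ported as getD _ 0 (the guard guarantees the key is there, so no KeyError)
def check_duplicate_links (links : List String) : Bool × List String :=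
  let st := links.foldl
    (fun (st : PySem.Dict String Int × List String) link =>
      let l := pvRstripSlash link
      if st.1.contains l = false then (st.1.insert l 1, st.2)
      else if st.1.getD l 0 == 1 then (st.1, st.2 ++ [l]) else st)
    (PySem.Dict.empty, [])
  let duplicates := st.2
  let has_duplicate := !duplicates.isEmpty
  (has_duplicate, duplicates)

-- ===== PORT B =====
-- duplicates.remove(value): each distinct value occurs in the list, so Python's
-- ValueError branch is unreachable; remove? is none exactly there, ported with getD rest
def check_duplicate_links_alt (links : List String) : Bool × List String :=
  let normalized := links.map pvRstripSlash
  let duplicates := (PySem.List.dedup normalized).foldl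
    (fun rest value => (PySem.List.remove? rest value).getD rest) normalized
  (!duplicates.isEmpty, duplicates)

-- ===== PRECONDITION & SPEC =====
def Spec_check_duplicate_links (links : List String) (out : Bool × List String) : Prop := out = check_duplicate_links_alt links
instance (links : List String) (out : Bool × List String) : Decidable (Spec_check_duplicate_links links out) := by unfold Spec_check_duplicate_links; infer_instance

-- ===== CLAIM (what is proved, stated in full; the proofs are below) =====
def Claim_equal_check_duplicate_links : Prop := ∀ (links : List String), Dom_check_duplicate_links links → Spec_check_duplicate_links links (check_duplicate_links links)

-- ===== LEMMAS AND PROOFS =====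

-- proof-side reference recursion: duplicates emitted while scanning ys with prefix pre
def pvScan (pre ys : List String) : List String :=
  match ys with
  | [] => []
  | x :: rest => (if pre.contains x then [x] else []) ++ pvScan (pre ++ [x]) rest

-- proof-side reference recursion: the distinct values of ys not already in pre, in order
def pvNewD (pre ys : List String) : List String :=
  match ys with
  | [] => []
  | x :: rest => if pre.contains x then pvNewD pre rest else x :: pvNewD (pre ++ [x]) rest

theorem pvScan_congr (ys : List String) :
    ∀ (p q : List String), (∀ y, p.contains y = q.contains y) → pvScan p ys = pvScan q ys := by
  induction ys with
  | nil => intro p q _; simp [pvScan]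
  | cons z zs ih =>
    intro p q hpq
    simp only [pvScan, hpq z]
    congr 1
    apply ih
    intro y
    rw [List.contains_append, List.contains_append, hpq]

theorem pvNewD_not_mem_pre (ys : List String) :
    ∀ (pre : List String) (y : String), y ∈ pvNewD pre ys → y ∉ pre := by
  induction ys with
  | nil => intro pre y h; simp [pvNewD] at h
  | cons z zs ih =>
    intro pre y h
    simp only [pvNewD] at h
    split at h
    · exact ih pre y h
    · rcases List.mem_cons.mp h with h1 | h1
      · subst h1
        rename_i hz
        simpa using hz
      · intro hy
        exact ih (pre ++ [z]) y h1 (List.mem_append_left _ hy)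

-- dict.fromkeys (= PySem.List.dedup) equals the reference recursion
theorem pvOfList_eq (ys : List String) :
    ∀ (pre : List String), ys.foldl PySem.Set.add pre = pre ++ pvNewD pre ys := by
  induction ys with
  | nil => intro pre; simp [pvNewD]
  | cons z zs ih =>
    intro pre
    simp only [List.foldl_cons, pvNewD, PySem.Set.add]
    by_cases h : z ∈ pre
    · simp [h, ih]
    · simp [h, ih]

theorem pvDedup_eq (ys : List String) : PySem.List.dedup ys = pvNewD [] ys := by
  have := pvOfList_eq ys []
  simpa [PySem.List.dedup, PySem.Set.ofList, PySem.Set.empty] using this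

-- list.remove on a cons cell
theorem pvRm_cons_ne (x y : String) (l : List String) (h : y ≠ x) :
    (PySem.List.remove? (x :: l) y).getD (x :: l) = x :: (PySem.List.remove? l y).getD l := by
  rw [PySem.List.remove?_cons_of_ne l (fun hxy => h hxy.symm)]
  cases PySem.List.remove? l y <;> simp

-- removing a value not in D commutes with the head of the working list
theorem pvFold_cons_not_mem (D : List String) :
    ∀ (x : String) (l : List String), x ∉ D →
    D.foldl (fun rest value => (PySem.List.remove? rest value).getD rest) (x :: l)
      = x :: D.foldl (fun rest value => (PySem.List.remove? rest value).getD rest) l := by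
  induction D with
  | nil => intro x l _; simp
  | cons d ds ih =>
    intro x l hx
    simp only [List.foldl_cons]
    rw [pvRm_cons_ne x d l (fun h => hx (h ▸ List.mem_cons_self))]
    exact ih x _ (fun h => hx (List.mem_cons_of_mem _ h))

-- B's remove-fold over the distinct values equals the reference scan
theorem pvB_fold_eq (ys : List String) :
    ∀ (pre : List String),
    (pvNewD pre ys).foldl (fun rest value => (PySem.List.remove? rest value).getD rest) ys
      = pvScan pre ys := by
  induction ys with
  | nil => intro pre; simp [pvNewD, pvScan]
  | cons x rest ih =>
    intro pre
    simp only [pvNewD, pvScan]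
    by_cases h : pre.contains x = true
    · simp only [h, ite_true]
      have hx : x ∉ pvNewD pre rest := fun hm => (pvNewD_not_mem_pre rest pre x hm) (by simpa using h)
      rw [pvFold_cons_not_mem (pvNewD pre rest) x rest hx, ih pre]
      simp only [List.singleton_append]
      have hcong : ∀ y, (pre ++ [x]).contains y = pre.contains y := by
        intro y
        rw [List.contains_append]
        by_cases hy : y = x
        · subst hy; simp [show y ∈ pre from by simpa using h]
        · simp [hy]
      rw [pvScan_congr rest (pre ++ [x]) pre hcong]
    · simp only [Bool.not_eq_true] at h
      simp only [h, Bool.false_eq_true, ite_false, List.foldl_cons,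
        PySem.List.remove?_cons_self, Option.getD_some, List.nil_append]
      exact ih (pre ++ [x])

-- A's dict fold: its duplicate list equals the reference scan; the dict is
-- characterised by the list `pre` of normalized links already seen (every stored value is 1)
theorem pvA_fold_eq :
    ∀ (ls : List String) (seen : PySem.Dict String Int) (dup pre : List String),
    (∀ x, seen.contains x = pre.contains x) →
    (∀ x, pre.contains x = true → seen.getD x 0 = 1) →
    (ls.foldl
      (fun (st : PySem.Dict String Int × List String) link =>
        let l := pvRstripSlash link
        if st.1.contains l = false then (st.1.insert l 1, st.2)
        else if st.1.getD l 0 == 1 then (st.1, st.2 ++ [l]) else st)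
      (seen, dup)).2 = dup ++ pvScan pre (ls.map pvRstripSlash) := by
  intro ls
  induction ls with
  | nil => intro seen dup pre _ _; simp [pvScan]
  | cons l ls ih =>
    intro seen dup pre hc hv
    simp only [List.foldl_cons, List.map_cons]
    set x := pvRstripSlash l with hx
    by_cases h : pre.contains x = true
    · have hsc : seen.contains x = true := by rw [hc]; exact h
      have hsv : seen.getD x 0 = 1 := hv x h
      simp only [hsc, hsv, Bool.true_eq_false, ite_false, beq_self_eq_true, ite_true]
      have hxmem : ∀ y, (pre ++ [x]).contains y = pre.contains y := by
        intro y
        rw [List.contains_append]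
        by_cases hy : y = x
        · subst hy; simp [show x ∈ pre from by simpa using h]
        · simp [hy]
      have hscan : pvScan (pre ++ [x]) (ls.map pvRstripSlash) = pvScan pre (ls.map pvRstripSlash) :=
        pvScan_congr _ _ _ hxmem
      rw [ih seen (dup ++ [x]) pre hc hv]
      simp [pvScan, hscan, show x ∈ pre from by simpa using h]
    · simp only [Bool.not_eq_true] at h
      have hsc : seen.contains x = false := by rw [hc]; exact h
      simp only [hsc, ite_true]
      have hpre : ∀ y, (seen.insert x 1).contains y = (pre ++ [x]).contains y := by
        intro y
        rw [PySem.Dict.contains_insert, hc, List.contains_append]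
        by_cases hy : y = x
        · simp [hy]
        · simp [hy, Bool.or_comm]
      have hpre2 : ∀ y, (pre ++ [x]).contains y = true → (seen.insert x 1).getD y 0 = 1 := by
        intro y hy
        rw [PySem.Dict.getD_insert]
        by_cases hy2 : y = x
        · simp [hy2]
        · simp only [hy2, ite_false]
          apply hv
          rw [List.contains_append] at hy
          rcases Bool.or_eq_true_iff.mp hy with h1 | h1
          · exact h1
          · exact absurd (by simpa using h1) hy2
      rw [ih (seen.insert x 1) dup (pre ++ [x]) hpre hpre2]
      simp [pvScan, show x ∉ pre from by simpa using h]

-- the two duplicate lists coincide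
theorem pvDup_eq (links : List String) :
    (check_duplicate_links links).2 = (check_duplicate_links_alt links).2 := by
  have ha := pvA_fold_eq links PySem.Dict.empty [] []
    (fun x => by simp [PySem.Dict.contains_empty])
    (fun x hx => by simp at hx)
  have hb := pvB_fold_eq (links.map pvRstripSlash) []
  simp only [List.nil_append] at ha
  unfold check_duplicate_links check_duplicate_links_alt
  simp only [ha, pvDedup_eq, hb]

-- ===== VERDICT (by name: the statement is the Claim_ definition above) =====
theorem check_duplicate_links_spec : Claim_equal_check_duplicate_links := by
  intro links _
  unfold Spec_check_duplicate_links
  have hA : check_duplicate_links links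
      = (!(check_duplicate_links links).2.isEmpty, (check_duplicate_links links).2) := rfl
  have hB : check_duplicate_links_alt links
      = (!(check_duplicate_links_alt links).2.isEmpty, (check_duplicate_links_alt links).2) := rfl
  rw [hA, hB, pvDup_eq]
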